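-- pv_equiv track=rewrite | github.com/kaluginpeter/Algorithms_and_structures_tasks | CodeWars/7kyu/The_Baum_Sweet_sequence.py | check
-- ===== SOURCE A (Python) =====
-- def check(i: int) -> bool:
--     if not i: return True
--     left: int = 0
--     b_i: str = bin(i)[2:]
--     for right in range(len(b_i)):
--         if b_i[right] == '1':
--             if right - left & 1: return False
--             left = right + 1
--     if len(b_i) - left & 1: return False
--     return True
-- ===== SOURCE B (Python) =====
-- def check(i: int) -> bool:
--     while i:
--         z = 0
--         while i % 2 == 0:
--             i //= 2
--             z += 1
--         if z % 2:
--             return False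
--         while i % 2 == 1:
--             i //= 2
--     return True
-- ===== Notes on version B (the rewrite author's own statement) =====
-- stated objective: alternative
-- what changed: B never builds the binary string: it works on the integer itself, repeatedly stripping the trailing run of zero bits (checking its length is even) and then the trailing run of one bits with division by 2, instead of A's left-to-right scan over bin(i) with last-'1' index bookkeeping.
-- outside the precondition, e.g. on check(-1): A returns False, B does not finish within the time limit
import Mathlib
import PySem

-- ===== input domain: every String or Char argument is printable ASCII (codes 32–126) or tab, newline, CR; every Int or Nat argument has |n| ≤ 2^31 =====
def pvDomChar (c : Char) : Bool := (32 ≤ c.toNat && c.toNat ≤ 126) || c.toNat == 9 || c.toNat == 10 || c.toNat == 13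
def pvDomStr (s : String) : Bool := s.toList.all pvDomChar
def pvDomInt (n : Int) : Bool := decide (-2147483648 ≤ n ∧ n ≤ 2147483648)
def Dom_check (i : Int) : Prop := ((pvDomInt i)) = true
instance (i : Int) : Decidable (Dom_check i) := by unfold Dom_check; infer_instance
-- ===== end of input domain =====

-- B works on the integer directly, stripping trailing bit-runs by division, instead of
-- scanning the characters of bin(i) (objective: alternative, same cost).

-- ===== PORT A =====
-- the 'for right in range(len(b_i))' loop with early returns; 'right' counts the
-- position reached, so at the list's end right = len(b_i) and the trailing check
-- 'len(b_i) - left & 1' is 'right - left & 1'.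
def checkLoop : List Char → Int → Int → Bool
  | [], right, left => if PySem.Int.band (right - left) 1 == 1 then false else true
  | c :: rest, right, left =>
    if c == '1' then
      if PySem.Int.band (right - left) 1 == 1 then false
      else checkLoop rest (right + 1) (right + 1)
    else checkLoop rest (right + 1) left

def check (i : Int) : Bool :=
  if i == 0 then true
  else checkLoop (PySem.List.slice (PySem.Int.toBinChars0b i) (some 2) none) 0 0

-- ===== PORT B =====
-- Each while loop is structural recursion on a Nat fuel (a totality guard only:
-- fuel = i.toNat always suffices on the Pre_ inputs, where the loops terminate).
-- 'while i % 2 == 0: i //= 2; z += 1' — returns (z, rest)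
def stripEvenF : Nat → Int → Int × Int
  | 0, i => (0, i)
  | fuel + 1, i =>
    if 0 < i ∧ PySem.Int.mod i 2 = 0 then
      ((stripEvenF fuel (PySem.Int.floordiv i 2)).1 + 1,
       (stripEvenF fuel (PySem.Int.floordiv i 2)).2)
    else (0, i)

def stripEven (i : Int) : Int × Int := stripEvenF i.toNat i

-- 'while i % 2 == 1: i //= 2'
def stripOddF : Nat → Int → Int
  | 0, i => i
  | fuel + 1, i =>
    if 0 < i ∧ PySem.Int.mod i 2 = 1 then stripOddF fuel (PySem.Int.floordiv i 2) else i

def stripOdd (i : Int) : Int := stripOddF i.toNat i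

-- the outer 'while i:' loop ('0 < i' = Python's 'i' truthiness on the Pre_ inputs)
def outerLoopF : Nat → Int → Bool
  | 0, _ => true
  | fuel + 1, i =>
    if 0 < i then
      if PySem.Int.mod (stripEven i).1 2 = 1 then false
      else outerLoopF fuel (stripOdd (stripEven i).2)
    else true

def check_alt (i : Int) : Bool := outerLoopF i.toNat i

-- ===== PRECONDITION & SPEC =====
-- Pre_ excludes negative i (outside the Baum–Sweet domain): A's False there is an
-- artefact of scanning the 'b' of '-0b…', and B's trailing-bit stripping does not
-- terminate on some negative inputs (e.g. i = -1).
def Pre_check (i : Int) : Prop := 0 ≤ i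
instance (i : Int) : Decidable (Pre_check i) := by unfold Pre_check; infer_instance
def pvWitness_check : Int := 6
def Spec_check (i : Int) (out : Bool) : Prop := out = check_alt i
instance (i : Int) (out : Bool) : Decidable (Spec_check i out) := by unfold Spec_check; infer_instance

-- ===== CLAIM =====
def Claim_equal_check : Prop := ∀ (i : Int), Dom_check i → Pre_check i → Spec_check i (check i)

-- ===== LEMMAS AND PROOFS =====
-- str.split('1') on the A side (proof-only): the maximal runs of non-'1' characters.
def splitOn1 : List Char → List (List Char)
  | [] => [[]]
  | c :: rest =>
    if c == '1' then [] :: splitOn1 rest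
    else
      match splitOn1 rest with
      | b :: bs => (c :: b) :: bs
      | [] => [[c]]

-- the Baum–Sweet property of a digit string: every zero-run has even length
def good (cs : List Char) : Bool := (splitOn1 cs).all (fun b => b.length % 2 == 0)

-- the binary digits of n, most significant first (= Nat.toDigits 2 n)
def bits (n : Nat) : List Char :=
  if n / 2 = 0 then [Nat.digitChar (n % 2)]
  else bits (n / 2) ++ [Nat.digitChar (n % 2)]
termination_by n
decreasing_by omega

theorem bits_small (n : Nat) (h : n / 2 = 0) : bits n = [Nat.digitChar (n % 2)] := by
  rw [bits, if_pos h]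

theorem bits_step (n : Nat) (h : n / 2 ≠ 0) : bits n = bits (n / 2) ++ [Nat.digitChar (n % 2)] := by
  rw [bits, if_neg h]

theorem splitOn1_ne_nil (cs : List Char) : splitOn1 cs ≠ [] := by
  cases cs with
  | nil => simp [splitOn1]
  | cons c rest =>
    simp only [splitOn1]
    split
    · simp
    · split <;> simp

theorem splitOn1_cons (cs : List Char) : ∃ b bs, splitOn1 cs = b :: bs := by
  cases h : splitOn1 cs with
  | nil => exact absurd h (splitOn1_ne_nil cs)
  | cons x xs => exact ⟨x, xs, rfl⟩

theorem band_one_eq (a : Int) :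
    (PySem.Int.band a 1 == 1) = decide (a % 2 = 1) := by
  rw [PySem.Int.band_one]
  show (Int.fmod a 2 == 1) = _
  rw [Int.fmod_eq_emod]
  rw [Bool.eq_iff_iff]
  simp only [beq_iff_eq, decide_eq_true_eq]
  simp

theorem checkLoop_eq (cs : List Char) : ∀ (right left : Int), left ≤ right →
    ∀ b bs, splitOn1 cs = b :: bs →
    checkLoop cs right left =
      (decide ((right - left + (b.length : Int)) % 2 = 0) &&
        bs.all (fun block => block.length % 2 == 0)) := by
  induction cs with
  | nil =>
    intro right left hle b bs hsplit
    simp only [splitOn1] at hsplit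
    injection hsplit with h1 h2
    subst h1; subst h2
    simp only [checkLoop, band_one_eq]
    rcases Int.emod_two_eq_zero_or_one (right - left) with h | h
    · rw [if_neg (by simp [h])]
      simp [h]
    · rw [if_pos (by simp [h])]
      simp [h]
  | cons c rest ih =>
    intro right left hle b bs hsplit
    by_cases hc : c = '1'
    · subst hc
      simp only [splitOn1, beq_self_eq_true, if_true] at hsplit
      injection hsplit with h1 h2
      subst h1; subst h2
      obtain ⟨b', bs', hsplit'⟩ := splitOn1_cons rest
      rw [hsplit']
      simp only [checkLoop, beq_self_eq_true, if_true, band_one_eq]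
      rcases Int.emod_two_eq_zero_or_one (right - left) with h | h
      · rw [if_neg (by simp [h]), ih (right + 1) (right + 1) (by omega) b' bs' hsplit']
        rw [Bool.eq_iff_iff]
        simp only [Bool.and_eq_true, decide_eq_true_eq, List.all_cons, List.length_nil,
          beq_iff_eq]
        constructor
        · rintro ⟨h1, h2⟩
          exact ⟨by omega, by omega, h2⟩
        · rintro ⟨h1, h2, h3⟩
          exact ⟨by omega, h3⟩
      · rw [if_pos (by simp [h])]
        simp [h]
    · have hcf : (c == '1') = false := by simp [hc]
      obtain ⟨b', bs', hsplit'⟩ := splitOn1_cons rest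
      simp only [splitOn1, hcf, Bool.false_eq_true, if_false] at hsplit
      rw [hsplit'] at hsplit
      injection hsplit with h1 h2
      subst h1; subst h2
      simp only [checkLoop, hcf, Bool.false_eq_true, if_false]
      rw [ih (right + 1) left (by omega) b' bs' hsplit']
      rw [Bool.eq_iff_iff]
      simp only [Bool.and_eq_true, decide_eq_true_eq, List.length_cons]
      constructor
      · rintro ⟨h1, h2⟩
        refine ⟨?_, h2⟩
        push_cast at *
        omega
      · rintro ⟨h1, h2⟩
        refine ⟨?_, h2⟩
        push_cast at *
        omega

-- Nat.toDigits 2 computes bits (fuel elimination)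
theorem toDigitsCore_eq_bits : ∀ (fuel n : Nat) (ds : List Char), n ≤ fuel →
    Nat.toDigitsCore 2 (fuel + 1) n ds = bits n ++ ds := by
  intro fuel
  induction fuel with
  | zero =>
    intro n ds h
    have : n = 0 := by omega
    subst this
    simp [Nat.toDigitsCore, bits]
  | succ fuel ih =>
    intro n ds h
    rw [Nat.toDigitsCore]
    by_cases h2 : n / 2 = 0
    · simp only [h2, if_true]
      rw [bits_small n h2]
      rfl
    · simp only [h2, if_false]
      rw [ih (n / 2) _ (by omega)]
      rw [bits_step n h2]
      simp

theorem toDigits_eq_bits (n : Nat) : Nat.toDigits 2 n = bits n := by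
  have := toDigitsCore_eq_bits n n [] (le_refl n)
  simpa [Nat.toDigits] using this

-- splitting a pure zero-run
theorem splitOn1_replicate (z : Nat) :
    splitOn1 (List.replicate z '0') = [List.replicate z '0'] := by
  induction z with
  | zero => simp [splitOn1]
  | succ z ih => simp [List.replicate_succ, splitOn1, ih]

-- splitting xs ++ '1' ++ zeros: the zero-run becomes the final block
theorem splitOn1_append : ∀ (xs : List Char) (z : Nat),
    splitOn1 (xs ++ '1' :: List.replicate z '0') = splitOn1 xs ++ [List.replicate z '0'] := by
  intro xs z
  induction xs with
  | nil => simp [splitOn1, splitOn1_replicate]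
  | cons c rest ih =>
    by_cases hc : c = '1'
    · subst hc
      simp only [List.cons_append, splitOn1, beq_self_eq_true, if_true, ih]
    · have hcf : (c == '1') = false := by simp [hc]
      obtain ⟨b, bs, hb⟩ := splitOn1_cons rest
      obtain ⟨b', bs', hb'⟩ := splitOn1_cons (rest ++ '1' :: List.replicate z '0')
      simp only [List.cons_append, splitOn1, hcf, Bool.false_eq_true, if_false, hb, hb']
      rw [hb, hb'] at ih
      injection ih with e1 e2
      subst e1
      simp [e2]

theorem good_append (xs : List Char) (z : Nat) :
    good (xs ++ '1' :: List.replicate z '0') = (good xs && (z % 2 == 0)) := by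
  simp [good, splitOn1_append]

theorem good_append_one (xs : List Char) : good (xs ++ ['1']) = good xs := by
  have := good_append xs 0
  simpa using this

-- bits n always ends in the digit character of n % 2
theorem bits_last (n : Nat) : ∃ f, bits n = f ++ [Nat.digitChar (n % 2)] := by
  by_cases h : n / 2 = 0
  · exact ⟨[], by rw [bits_small n h]; rfl⟩
  · exact ⟨bits (n / 2), bits_step n h⟩

-- ===== A side: check i = good (bits i.toNat) for 0 < i =====
theorem check_eq_good (i : Int) (h : 0 < i) : check i = good (bits i.toNat) := by
  have hne : (i == 0) = false := by simp; omega
  rw [check, hne]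
  simp only [Bool.false_eq_true, if_false]
  have hb : PySem.Int.toBinChars0b i = '0' :: 'b' :: Nat.toDigits 2 i.toNat := by
    rw [PySem.Int.toBinChars0b, if_neg (by omega)]
  rw [hb, show ((2 : Int)) = ((2 : Nat) : Int) from rfl, PySem.List.slice_from_natCast]
  simp only [List.drop_succ_cons, List.drop_zero, toDigits_eq_bits]
  obtain ⟨b, bs, hs⟩ := splitOn1_cons (bits i.toNat)
  rw [checkLoop_eq _ 0 0 le_rfl b bs hs]
  rw [good, hs]
  simp only [List.all_cons]
  congr 1
  rw [Bool.eq_iff_iff]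
  simp only [decide_eq_true_eq, beq_iff_eq]
  omega

-- ===== B side =====
theorem stripEvenF_le : ∀ (fuel : Nat) (i : Int), i.toNat ≤ fuel → 0 < i →
    0 < (stripEvenF fuel i).2 ∧ (stripEvenF fuel i).2 ≤ i ∧
    PySem.Int.mod (stripEvenF fuel i).2 2 = 1 := by
  intro fuel
  induction fuel with
  | zero => intro i h1 h2; omega
  | succ fuel ih =>
    intro i hle hpos
    rw [stripEvenF]
    by_cases h : 0 < i ∧ PySem.Int.mod i 2 = 0
    · have hd : PySem.Int.floordiv i 2 = i / 2 := PySem.Int.floordiv_eq_ediv_of_pos (by omega)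
      have hm : PySem.Int.mod i 2 = i % 2 := PySem.Int.mod_eq_emod_of_pos (by omega)
      have hm2 : i % 2 = 0 := by rw [← hm]; exact h.2
      rw [if_pos h, hd]
      have := ih (i / 2) (by omega) (by omega)
      exact ⟨this.1, by omega, this.2.2⟩
    · have hm : PySem.Int.mod i 2 = i % 2 := PySem.Int.mod_eq_emod_of_pos (by omega)
      rw [if_neg h]
      refine ⟨hpos, le_refl _, ?_⟩
      rw [hm]
      simp only [not_and] at h
      have := h hpos
      rw [hm] at this
      omega

theorem stripEven_le (i : Int) (h : 0 < i) :
    0 < (stripEven i).2 ∧ (stripEven i).2 ≤ i ∧ PySem.Int.mod (stripEven i).2 2 = 1 := by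
  unfold stripEven
  exact stripEvenF_le i.toNat i (le_refl _) h

theorem stripOddF_le : ∀ (fuel : Nat) (j : Int), 0 ≤ j →
    0 ≤ stripOddF fuel j ∧ stripOddF fuel j ≤ j := by
  intro fuel
  induction fuel with
  | zero => intro j h; simp [stripOddF]; omega
  | succ fuel ih =>
    intro j hpos
    rw [stripOddF]
    by_cases h : 0 < j ∧ PySem.Int.mod j 2 = 1
    · have hd : PySem.Int.floordiv j 2 = j / 2 := PySem.Int.floordiv_eq_ediv_of_pos (by omega)
      rw [if_pos h, hd]
      have := ih (j / 2) (by omega)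
      omega
    · rw [if_neg h]; omega

theorem stripOdd_lt (j : Int) (h : 0 < j) (hm : PySem.Int.mod j 2 = 1) :
    0 ≤ stripOdd j ∧ stripOdd j < j := by
  obtain ⟨n, hn⟩ : ∃ n, j.toNat = n + 1 := ⟨j.toNat - 1, by omega⟩
  unfold stripOdd
  rw [hn, stripOddF, if_pos ⟨h, hm⟩]
  have hd : PySem.Int.floordiv j 2 = j / 2 := PySem.Int.floordiv_eq_ediv_of_pos (by omega)
  rw [hd]
  have hmm : PySem.Int.mod j 2 = j % 2 := PySem.Int.mod_eq_emod_of_pos (by omega)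
  have := stripOddF_le n (j / 2) (by omega)
  omega

-- stripEven peels the trailing zero-run off the digit string
theorem stripEvenF_bits : ∀ (fuel : Nat) (i : Int), i.toNat ≤ fuel → 0 < i →
    0 ≤ (stripEvenF fuel i).1 ∧
    bits i.toNat = bits (stripEvenF fuel i).2.toNat ++
      List.replicate (stripEvenF fuel i).1.toNat '0' := by
  intro fuel
  induction fuel with
  | zero => intro i h1 h2; omega
  | succ fuel ih =>
    intro i hle hpos
    rw [stripEvenF]
    by_cases h : 0 < i ∧ PySem.Int.mod i 2 = 0
    · have hd : PySem.Int.floordiv i 2 = i / 2 := PySem.Int.floordiv_eq_ediv_of_pos (by omega)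
      have hm : PySem.Int.mod i 2 = i % 2 := PySem.Int.mod_eq_emod_of_pos (by omega)
      have hm2 : i % 2 = 0 := by rw [← hm]; exact h.2
      rw [if_pos h, hd]
      obtain ⟨hz, hbits⟩ := ih (i / 2) (by omega) (by omega)
      refine ⟨by omega, ?_⟩
      have hdiv : (i / 2).toNat = i.toNat / 2 := by omega
      have hmod : i.toNat % 2 = 0 := by omega
      have hstep : bits i.toNat = bits (i.toNat / 2) ++ ['0'] := by
        rw [bits_step i.toNat (by omega), hmod]
        simp [show Nat.digitChar 0 = '0' from by decide]
      rw [hstep, ← hdiv, hbits, List.append_assoc]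
      have hz1 : ((stripEvenF fuel (i / 2)).1 + 1).toNat
          = (stripEvenF fuel (i / 2)).1.toNat + 1 := by omega
      rw [hz1, List.replicate_succ']
    · rw [if_neg h]
      exact ⟨le_refl 0, by simp⟩

theorem stripEven_bits (i : Int) (h : 0 < i) :
    0 ≤ (stripEven i).1 ∧
    bits i.toNat = bits (stripEven i).2.toNat ++ List.replicate (stripEven i).1.toNat '0' := by
  unfold stripEven
  exact stripEvenF_bits i.toNat i (le_refl _) h

-- stripOdd peels trailing one-bits; 'good' is unchanged by that
theorem stripOddF_good : ∀ (fuel : Nat) (j : Int), j.toNat ≤ fuel → 0 < j →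
    good (bits j.toNat)
      = (if stripOddF fuel j = 0 then true else good (bits (stripOddF fuel j).toNat)) := by
  intro fuel
  induction fuel with
  | zero => intro j h1 h2; omega
  | succ fuel ih =>
    intro j hle hpos
    rw [stripOddF]
    by_cases h : 0 < j ∧ PySem.Int.mod j 2 = 1
    · have hd : PySem.Int.floordiv j 2 = j / 2 := PySem.Int.floordiv_eq_ediv_of_pos (by omega)
      have hm : PySem.Int.mod j 2 = j % 2 := PySem.Int.mod_eq_emod_of_pos (by omega)
      have hm2 : j % 2 = 1 := by rw [← hm]; exact h.2
      rw [if_pos h, hd]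
      have hmodN : j.toNat % 2 = 1 := by omega
      by_cases hj1 : j = 1
      · subst hj1
        have h12 : ((1 : Int) / 2) = 0 := by decide
        have hs0 : ∀ f : Nat, stripOddF f (0 : Int) = 0 := by
          intro f
          cases f with
          | zero => rfl
          | succ f => rw [stripOddF, if_neg (by norm_num)]
        rw [h12, hs0 fuel, if_pos rfl]
        have hb1 : bits (1 : Int).toNat = ['1'] := by
          rw [show ((1 : Int).toNat) = 1 from rfl, bits_small 1 (by decide)]
          decide
        rw [hb1]
        decide
      · have hj3 : 3 ≤ j := by omega
        have hstep : bits j.toNat = bits (j.toNat / 2) ++ ['1'] := by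
          rw [bits_step j.toNat (by omega), hmodN]
          simp [show Nat.digitChar 1 = '1' from by decide]
        have hdiv : (j / 2).toNat = j.toNat / 2 := by omega
        rw [hstep, good_append_one, ← hdiv]
        exact ih (j / 2) (by omega) (by omega)
    · rw [if_neg h]
      have hj0 : j ≠ 0 := by omega
      rw [if_neg hj0]

theorem stripOdd_good (j : Int) (h : 0 < j) :
    good (bits j.toNat) = (if stripOdd j = 0 then true else good (bits (stripOdd j).toNat)) := by
  unfold stripOdd
  exact stripOddF_good j.toNat j (le_refl _) h

theorem outerLoopF_nonpos (fuel : Nat) (i : Int) (h : ¬ 0 < i) : outerLoopF fuel i = true := by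
  cases fuel with
  | zero => rfl
  | succ fuel => rw [outerLoopF, if_neg h]

-- the outer loop computes 'good' of the digit string
theorem outer_eq : ∀ (fuel : Nat) (i : Int), i.toNat ≤ fuel → 0 < i →
    outerLoopF fuel i = good (bits i.toNat) := by
  intro fuel
  induction fuel with
  | zero => intro i h1 h2; omega
  | succ fuel ih =>
    intro i hle hpos
    obtain ⟨hr, hri, hrm⟩ := stripEven_le i hpos
    obtain ⟨hz, hbits⟩ := stripEven_bits i hpos
    set z := (stripEven i).1 with hzdef
    set r := (stripEven i).2 with hrdef
    have hmz : PySem.Int.mod z 2 = z % 2 := PySem.Int.mod_eq_emod_of_pos (by omega)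
    have hrmod : r.toNat % 2 = 1 := by
      have := PySem.Int.mod_eq_emod_of_pos (a := r) (b := 2) (by omega)
      omega
    obtain ⟨f, hf⟩ := bits_last r.toNat
    rw [hrmod] at hf
    have hbits2 : bits i.toNat = f ++ '1' :: List.replicate z.toNat '0' := by
      rw [hbits, hf, List.append_assoc]
      rfl
    have hgood : good (bits i.toNat) = (good f && (z.toNat % 2 == 0)) := by
      rw [hbits2, good_append]
    have hgoodr : good (bits r.toNat) = good f := by
      have : bits r.toNat = f ++ ['1'] := by simpa using hf
      rw [this, good_append_one]
    rw [outerLoopF, if_pos hpos]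
    simp only [← hzdef, ← hrdef]
    by_cases hodd : PySem.Int.mod z 2 = 1
    · rw [if_pos hodd]
      rw [hgood]
      have : (z.toNat % 2 == 0) = false := by
        simp only [beq_eq_false_iff_ne, ne_eq]
        omega
      simp [this]
    · rw [if_neg hodd]
      have hzeven : z.toNat % 2 = 0 := by omega
      rw [hgood, hzeven]
      simp only [beq_self_eq_true, Bool.and_true]
      obtain ⟨hq0, hqlt⟩ := stripOdd_lt r hr hrm
      rw [← hgoodr, stripOdd_good r hr]
      by_cases hq : stripOdd r = 0
      · rw [if_pos hq, hq]
        exact outerLoopF_nonpos fuel 0 (by norm_num)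
      · rw [if_neg hq]
        exact ih (stripOdd r) (by omega) (by omega)

-- ===== VERDICT =====
theorem check_spec : Claim_equal_check := by
  intro i _ hpre
  unfold Spec_check check_alt
  by_cases h0 : i = 0
  · subst h0
    rfl
  · have hpos : 0 < i := by unfold Pre_check at hpre; omega
    rw [check_eq_good i hpos, outer_eq i.toNat i (le_refl _) hpos]
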